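-- pv_equiv track=rewrite | github.com/dArK-sEiD05/Ragworks-assessment | backend engineer/problems/problem-3/dashboard/monitoring_dashboard.py | _determine_system_status
-- ===== SOURCE A (Python) =====
-- from typing import Dict, Any, List, Optional
--
-- def _determine_system_status(performance_metrics: Dict, alerts: List[Dict]) -> str:
--     """Determine overall system status."""
--     critical_alerts = [a for a in alerts if a.get("severity") == "critical"]
--     high_alerts = [a for a in alerts if a.get("severity") == "high"]
--
--     if critical_alerts:
--         return "critical"
--     elif high_alerts:
--         return "degraded"
--     else:
--         return "healthy"
-- ===== SOURCE B (Python) =====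
-- def _determine_system_status(performance_metrics, alerts):
--     """Determine overall system status."""
--     # One pass maintaining a numeric severity rank (critical=2, high=1, other=0);
--     # the running maximum is mapped back to a status at the end.
--     rank = 0
--     for a in alerts:
--         s = a.get("severity")
--         rank = max(rank, 2 if s == "critical" else 1 if s == "high" else 0)
--     if rank >= 2:
--         return "critical"
--     if rank == 1:
--         return "degraded"
--     return "healthy"
-- ===== Notes on version B (the rewrite author's own statement) =====
-- stated objective: alternative
-- what changed: Replaces two filtering passes over the alert list (and truthiness tests of the filtered lists) with a single fold that maintains the maximum numeric severity rank, mapped back to a status string at the end.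
import Mathlib
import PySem

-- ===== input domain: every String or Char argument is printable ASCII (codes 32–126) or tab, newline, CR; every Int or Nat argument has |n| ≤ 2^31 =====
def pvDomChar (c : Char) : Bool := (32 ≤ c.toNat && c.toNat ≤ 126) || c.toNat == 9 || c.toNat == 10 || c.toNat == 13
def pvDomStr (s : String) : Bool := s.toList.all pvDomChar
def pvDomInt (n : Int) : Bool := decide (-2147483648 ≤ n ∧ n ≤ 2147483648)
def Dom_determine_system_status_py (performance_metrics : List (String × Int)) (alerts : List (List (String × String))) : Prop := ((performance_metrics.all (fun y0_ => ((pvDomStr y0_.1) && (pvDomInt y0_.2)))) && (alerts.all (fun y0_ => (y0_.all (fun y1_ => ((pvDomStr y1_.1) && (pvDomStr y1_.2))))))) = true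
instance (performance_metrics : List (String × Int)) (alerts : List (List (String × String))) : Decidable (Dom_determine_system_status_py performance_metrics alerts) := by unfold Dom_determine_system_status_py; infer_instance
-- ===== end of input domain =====

-- ===== PORT A =====
-- B folds the alert list once into a maximal numeric severity rank instead of A's two
-- filtering passes (objective: alternative decomposition, same cost).

-- a.get("severity") on an association-list dict: first matching key, none if absent (exact for Python dict since keys are unique)
def pvGetSeverity (a : List (String × String)) : Option String :=
  (a.find? (fun p => p.1 == "severity")).map (·.2)

def determine_system_status_py (_performance_metrics : List (String × Int)) (alerts : List (List (String × String))) : String :=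
  let critical_alerts := alerts.filter (fun a => pvGetSeverity a == some "critical")
  let high_alerts := alerts.filter (fun a => pvGetSeverity a == some "high")
  if !critical_alerts.isEmpty then "critical"
  else if !high_alerts.isEmpty then "degraded"
  else "healthy"

-- ===== PORT B =====
-- rank of one alert: 2 if s == "critical" else 1 if s == "high" else 0
def sevRank (a : List (String × String)) : Nat :=
  if pvGetSeverity a == some "critical" then 2
  else if pvGetSeverity a == some "high" then 1
  else 0

def determine_system_status_py_alt (_performance_metrics : List (String × Int)) (alerts : List (List (String × String))) : String :=
  let rank := alerts.foldl (fun r a => max r (sevRank a)) 0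
  if 2 ≤ rank then "critical"
  else if rank == 1 then "degraded"
  else "healthy"

-- ===== PRECONDITION & SPEC =====
def Spec_determine_system_status_py (performance_metrics : List (String × Int)) (alerts : List (List (String × String))) (out : String) : Prop := out = determine_system_status_py_alt performance_metrics alerts
instance (performance_metrics : List (String × Int)) (alerts : List (List (String × String))) (out : String) : Decidable (Spec_determine_system_status_py performance_metrics alerts out) := by unfold Spec_determine_system_status_py; infer_instance

-- ===== CLAIM (what is proved, stated in full; the proofs are below) =====
def Claim_equal_determine_system_status_py : Prop := ∀ (performance_metrics : List (String × Int)) (alerts : List (List (String × String))), Dom_determine_system_status_py performance_metrics alerts → Spec_determine_system_status_py performance_metrics alerts (determine_system_status_py performance_metrics alerts)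

-- ===== LEMMAS AND PROOFS =====

-- the fold's accumulator commutes out as a max
theorem foldl_rank_acc (alerts : List (List (String × String))) (r : Nat) :
    alerts.foldl (fun r a => max r (sevRank a)) r
      = max r (alerts.foldl (fun r a => max r (sevRank a)) 0) := by
  induction alerts generalizing r with
  | nil => simp
  | cons a l ih =>
    simp only [List.foldl_cons]
    rw [ih (max r (sevRank a)), ih (max 0 (sevRank a))]
    omega

-- the fold reaches 2 exactly when some alert has severity "critical"
theorem rank_ge_two_iff (alerts : List (List (String × String))) :
    2 ≤ alerts.foldl (fun r a => max r (sevRank a)) 0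
      ↔ ∃ a ∈ alerts, pvGetSeverity a == some "critical" := by
  induction alerts with
  | nil => simp
  | cons a l ih =>
    rw [List.foldl_cons, foldl_rank_acc]
    simp only [List.mem_cons, exists_eq_or_imp]
    rw [← ih]
    by_cases h1 : (pvGetSeverity a == some "critical") = true <;>
      by_cases h2 : (pvGetSeverity a == some "high") = true <;>
      simp [sevRank, h1, h2]

-- the fold reaches ≥ 1 exactly when some alert has severity "critical" or "high"
theorem rank_ge_one_iff (alerts : List (List (String × String))) :
    1 ≤ alerts.foldl (fun r a => max r (sevRank a)) 0
      ↔ ∃ a ∈ alerts, (pvGetSeverity a == some "critical" ∨ pvGetSeverity a == some "high") := by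
  induction alerts with
  | nil => simp
  | cons a l ih =>
    rw [List.foldl_cons, foldl_rank_acc]
    simp only [List.mem_cons, exists_eq_or_imp]
    rw [← ih]
    by_cases h1 : (pvGetSeverity a == some "critical") = true <;>
      by_cases h2 : (pvGetSeverity a == some "high") = true <;>
      simp [sevRank, h1, h2]

-- ===== VERDICT (by name: the statement is the Claim_ definition above) =====
theorem determine_system_status_py_spec : Claim_equal_determine_system_status_py := by
  intro pm alerts _
  unfold Spec_determine_system_status_py determine_system_status_py determine_system_status_py_alt
  simp only [Bool.not_eq_eq_eq_not, Bool.not_true, List.isEmpty_eq_false_iff_exists_mem,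
    List.mem_filter]
  by_cases hc : ∃ a ∈ alerts, pvGetSeverity a = some "critical"
  · have h2 : 2 ≤ alerts.foldl (fun r a => max r (sevRank a)) 0 :=
      (rank_ge_two_iff alerts).2 (by simpa using hc)
    simp [hc, h2]
  · by_cases hh : ∃ a ∈ alerts, pvGetSeverity a = some "high"
    · have h1 : 1 ≤ alerts.foldl (fun r a => max r (sevRank a)) 0 :=
        (rank_ge_one_iff alerts).2 (by simpa using hh.imp fun a ⟨ha, hsa⟩ => ⟨ha, Or.inr hsa⟩)
      have h2 : ¬ 2 ≤ alerts.foldl (fun r a => max r (sevRank a)) 0 := fun h =>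
        hc (by simpa using (rank_ge_two_iff alerts).1 h)
      have hr1 : alerts.foldl (fun r a => max r (sevRank a)) 0 = 1 := by omega
      simp [hc, hh, hr1]
    · have h1 : ¬ 1 ≤ alerts.foldl (fun r a => max r (sevRank a)) 0 := by
        intro h
        rcases (rank_ge_one_iff alerts).1 h with ⟨a, ha, hca | hha⟩
        · exact hc ⟨a, ha, by simpa using hca⟩
        · exact hh ⟨a, ha, by simpa using hha⟩
      have h0 : alerts.foldl (fun r a => max r (sevRank a)) 0 = 0 := by omega
      simp [hc, hh, h0]
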